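-- pv_equiv track=rewrite | github.com/mouredev/retos-programacion-2023 | Retos/Reto #31 - EL ÁBACO [Fácil]/python/GuerraxP.py | abaco
-- ===== SOURCE A (Python) =====
-- def abaco(a):
--
--     result=0
--
--     for i in a:
--         cont=0
--         for j in i:
--             if j =="O":
--                 cont=cont+1
--             else:
--                 if j =="-":
--                     result= (result*10) +cont
--                 break
--
--     return result
-- ===== SOURCE B (Python) =====
-- def abaco(a):
--     # Stage 1: a row encodes a digit d iff its first '-' sits at position d
--     # with nothing but 'O' before it; collect those digits in order.
--     valid = []
--     for row in a:
--         p = row.find("-")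
--         if p != -1 and row[:p] == "O" * p:
--             valid.append(p)
--     # Stage 2: positional notation, each digit weighted by its power of ten.
--     n = len(valid)
--     return sum(d * 10 ** (n - 1 - i) for i, d in enumerate(valid))
-- ===== Notes on version B (the rewrite author's own statement) =====
-- stated objective: alternative
-- what changed: A's single pass with a char-by-char counting loop and a Horner-style accumulator is replaced by two staged passes: per row a find('-') plus prefix-equality test selects the digit, then the result is assembled as an explicit positional sum of digits times powers of ten instead of repeated *10 accumulation.
import Mathlib
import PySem

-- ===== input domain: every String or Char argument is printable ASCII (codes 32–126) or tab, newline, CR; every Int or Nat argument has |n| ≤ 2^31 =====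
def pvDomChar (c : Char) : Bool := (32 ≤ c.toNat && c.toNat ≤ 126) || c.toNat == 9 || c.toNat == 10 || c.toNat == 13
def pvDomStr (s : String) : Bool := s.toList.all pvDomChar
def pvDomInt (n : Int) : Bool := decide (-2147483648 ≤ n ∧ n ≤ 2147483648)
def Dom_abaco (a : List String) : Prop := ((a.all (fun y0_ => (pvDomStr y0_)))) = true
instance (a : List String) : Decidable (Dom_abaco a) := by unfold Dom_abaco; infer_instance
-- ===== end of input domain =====

-- B replaces A's single-pass char-counting/Horner loop by two staged passes
-- (find('-') + prefix test collects the digits, then a positional power-of-ten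
-- sum assembles the result); alternative decomposition, same cost.

-- ===== PORT A =====
-- inner 'for j in i' loop: count leading 'O's, on the first other char fold if '-', then break
def abacoRow (cs : List Char) (cont result : Int) : Int :=
  match cs with
  | [] => result
  | c :: rest =>
    if c = 'O' then abacoRow rest (cont + 1) result
    else if c = '-' then result * 10 + cont else result

def abaco (a : List String) : Int :=
  a.foldl (fun result i => abacoRow i.toList 0 result) 0

-- ===== PORT B =====
-- Source B stage 1: row.find("-") is PySem.Str.find, row[:p] is PySem.Str.slice,
-- "O" * p is ported as replicate p.toNat 'O' (exact for p ≥ 0; for p = -1 the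
-- first conjunct is already false, matching Python's short-circuit).
-- Source B stage 2: sum over enumerate(valid) of d * 10 ** (n - 1 - i)
-- (exponent n - 1 - i is nonnegative for every enumerated index, so .toNat is exact).
def abaco_alt (a : List String) : Int :=
  let valid : List Int :=
    a.foldl
      (fun acc row =>
        let p := PySem.Str.find row "-"
        if p ≠ -1 ∧ PySem.Str.slice row none (some p) = String.ofList (List.replicate p.toNat 'O')
        then acc ++ [p] else acc)
      []
  let n : Int := valid.length
  (PySem.List.enumerate valid 0).foldl (fun s pr => s + pr.2 * 10 ^ (n - 1 - pr.1).toNat) 0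

-- ===== PRECONDITION & SPEC =====
def Spec_abaco (a : List String) (out : Int) : Prop := out = abaco_alt a
instance (a : List String) (out : Int) : Decidable (Spec_abaco a out) := by unfold Spec_abaco; infer_instance

-- ===== CLAIM (what is proved, stated in full; the proofs are below) =====
def Claim_equal_abaco : Prop := ∀ (a : List String), Dom_abaco a → Spec_abaco a (abaco a)

-- ===== LEMMAS AND PROOFS =====

-- The digit a row contributes (if any): leading-'O' run length, provided the
-- char after the run is '-'.
def rowDig (cs : List Char) : Option Int :=
  let d := cs.dropWhile (fun c => c = 'O')
  let k : Nat := cs.length - d.length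
  if k < cs.length ∧ cs.getD k ' ' = '-' then some (k : Int) else none

def digitsOf (a : List String) : List Int := a.filterMap (fun row => rowDig row.toList)

-- A-side: one row of A's loop in terms of rowDig
lemma abacoRow_eq (cs : List Char) (cont result : Int) :
    abacoRow cs cont result =
      (match rowDig cs with
       | some d => result * 10 + cont + d
       | none => result) := by
  induction cs generalizing cont with
  | nil => simp [abacoRow, rowDig]
  | cons c rest ih =>
    by_cases hO : c = 'O'
    · subst hO
      have hdw : List.dropWhile (fun c => decide (c = 'O')) ('O' :: rest)
          = rest.dropWhile (fun c => decide (c = 'O')) :=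
        List.dropWhile_cons_of_pos (by simp)
      rw [show abacoRow ('O' :: rest) cont result = abacoRow rest (cont + 1) result from by
        simp [abacoRow]]
      rw [ih]
      unfold rowDig
      simp only [hdw]
      set d := rest.dropWhile (fun c => decide (c = 'O')) with hd
      have hle : d.length ≤ rest.length := hd ▸ List.length_dropWhile_le _ _
      have hn : ('O' :: rest).length - d.length = (rest.length - d.length) + 1 := by
        simp only [List.length_cons]; omega
      rw [hn]
      have hg : ('O' :: rest).getD (rest.length - d.length + 1) ' '
          = rest.getD (rest.length - d.length) ' ' := by
        simp [List.getD]
      rw [hg]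
      have hlt : (rest.length - d.length + 1 < ('O' :: rest).length)
          ↔ (rest.length - d.length < rest.length) := by
        simp only [List.length_cons]; omega
      by_cases h : rest.length - d.length < rest.length ∧ rest.getD (rest.length - d.length) ' ' = '-'
      · rw [if_pos h, if_pos ⟨hlt.mpr h.1, h.2⟩]
        push_cast; ring
      · rw [if_neg h, if_neg (by rw [hlt]; exact h)]
    · have hdw : List.dropWhile (fun x => decide (x = 'O')) (c :: rest) = c :: rest :=
        List.dropWhile_cons_of_neg (by simp [hO])
      unfold rowDig
      simp only [abacoRow, if_neg hO, hdw, Nat.sub_self]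
      by_cases hm : c = '-'
      · simp [hm, List.getD]
      · simp [hm, List.getD]

-- A equals the Horner fold over the digit list
lemma abaco_foldl_horner (a : List String) (r : Int) :
    a.foldl (fun result i => abacoRow i.toList 0 result) r
      = (digitsOf a).foldl (fun r d => r * 10 + d) r := by
  unfold digitsOf
  induction a generalizing r with
  | nil => rfl
  | cons x xs ih =>
    rw [List.foldl_cons, List.filterMap_cons]
    cases h : rowDig x.toList with
    | none => rw [abacoRow_eq, h]; exact ih r
    | some d => rw [abacoRow_eq, h, List.foldl_cons]; simpa using ih (r * 10 + d)

-- find.go shift lemma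
lemma find_go_succ (sub : List Char) (t : List Char) (k : Nat) :
    PySem.Chars.find.go sub t (k + 1) =
      (if PySem.Chars.find.go sub t k = -1 then -1 else PySem.Chars.find.go sub t k + 1) := by
  induction t generalizing k with
  | nil =>
    unfold PySem.Chars.find.go
    by_cases h : sub.isEmpty
    · simp [h]
    · simp [h]
  | cons c rest ih =>
    unfold PySem.Chars.find.go
    by_cases h : sub.isPrefixOf (c :: rest)
    · simp [h]
    · simp only [h, if_false, Bool.false_eq_true]
      exact ih (k + 1)

lemma find_nonneg_or (sub t : List Char) :
    PySem.Chars.find t sub = -1 ∨ 0 ≤ PySem.Chars.find t sub := by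
  unfold PySem.Chars.find
  induction t with
  | nil =>
    unfold PySem.Chars.find.go
    by_cases h : sub.isEmpty <;> simp [h]
  | cons c rest ih =>
    unfold PySem.Chars.find.go
    by_cases h : sub.isPrefixOf (c :: rest)
    · simp [h]
    · simp only [h, if_false, Bool.false_eq_true]
      rw [show (0 : Nat) + 1 = 0 + 1 from rfl, find_go_succ]
      rcases ih with h1 | h1 <;> simp_all [PySem.Chars.find] <;> omega

-- B-side per-row test (take-form) equals rowDig
lemma rowDig_cons_O (rest : List Char) :
    rowDig ('O' :: rest) = (rowDig rest).map (fun d => d + 1) := by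
  unfold rowDig
  have hdw : List.dropWhile (fun c => decide (c = 'O')) ('O' :: rest)
      = rest.dropWhile (fun c => decide (c = 'O')) :=
    List.dropWhile_cons_of_pos (by simp)
  simp only [hdw]
  set d := rest.dropWhile (fun c => decide (c = 'O')) with hd
  have hle : d.length ≤ rest.length := hd ▸ List.length_dropWhile_le _ _
  have hn : ('O' :: rest).length - d.length = (rest.length - d.length) + 1 := by
    simp only [List.length_cons]; omega
  rw [hn]
  have hg : ('O' :: rest).getD (rest.length - d.length + 1) ' '
      = rest.getD (rest.length - d.length) ' ' := by
    simp [List.getD]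
  rw [hg]
  have hlt : (rest.length - d.length + 1 < ('O' :: rest).length)
      ↔ (rest.length - d.length < rest.length) := by
    simp only [List.length_cons]; omega
  by_cases h : rest.length - d.length < rest.length ∧ rest.getD (rest.length - d.length) ' ' = '-'
  · rw [if_pos h, if_pos ⟨hlt.mpr h.1, h.2⟩]
    simp
  · rw [if_neg h, if_neg (by rw [hlt]; exact h)]
    simp

lemma condB_eq_rowDig (cs : List Char) :
    (let p := PySem.Chars.find cs ['-']
     if p ≠ -1 ∧ cs.take p.toNat = List.replicate p.toNat 'O' then some p else none)
      = rowDig cs := by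
  induction cs with
  | nil =>
    simp only [rowDig]
    unfold PySem.Chars.find PySem.Chars.find.go
    simp
  | cons c rest ih =>
    by_cases hO : c = 'O'
    · subst hO
      have hfind : PySem.Chars.find ('O' :: rest) ['-']
          = (if PySem.Chars.find rest ['-'] = -1 then -1 else PySem.Chars.find rest ['-'] + 1) := by
        unfold PySem.Chars.find
        conv_lhs => unfold PySem.Chars.find.go
        simp only [List.isPrefixOf, show (('-' : Char) == 'O') = false from rfl,
          Bool.false_and, Bool.false_eq_true, if_false]
        exact find_go_succ ['-'] rest 0
      rw [rowDig_cons_O, ← ih]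
      simp only [hfind]
      rcases find_nonneg_or ['-'] rest with hneg | hpos
      · simp [hneg]
      · have hne : PySem.Chars.find rest ['-'] ≠ -1 := by omega
        rw [if_neg hne]
        set f := PySem.Chars.find rest ['-'] with hf
        have htn : (f + 1).toNat = f.toNat + 1 := by omega
        simp only [htn, List.take_succ_cons, List.replicate_succ]
        by_cases hc : rest.take f.toNat = List.replicate f.toNat 'O'
        · rw [if_pos ⟨by omega, by rw [hc]⟩, if_pos ⟨hne, hc⟩]
          simp
        · rw [if_neg (by intro h; exact hc (by have := h.2; simp only [List.cons.injEq] at this; exact this.2)),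
            if_neg (by intro h; exact hc h.2)]
          simp
    · have hfind : PySem.Chars.find (c :: rest) ['-']
          = (if c = '-' then 0 else
              (if PySem.Chars.find rest ['-'] = -1 then -1 else PySem.Chars.find rest ['-'] + 1)) := by
        unfold PySem.Chars.find
        conv_lhs => unfold PySem.Chars.find.go
        by_cases hm : c = '-'
        · subst hm
          simp [List.isPrefixOf]
        · have : (('-' : Char) == c) = false := by
            simp [beq_iff_eq]; exact fun h => hm h.symm
          simp only [List.isPrefixOf, this, Bool.false_and, Bool.false_eq_true, if_false, if_neg hm]
          exact find_go_succ ['-'] rest 0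
      have hdw : List.dropWhile (fun x => decide (x = 'O')) (c :: rest) = c :: rest :=
        List.dropWhile_cons_of_neg (by simp [hO])
      have hrow : rowDig (c :: rest) = (if c = '-' then some 0 else none) := by
        unfold rowDig
        simp only [hdw, Nat.sub_self]
        by_cases hm : c = '-'
        · simp [hm, List.getD]
        · simp [hm, List.getD]
      rw [hrow]
      simp only [hfind]
      by_cases hm : c = '-'
      · simp [hm]
      · simp only [if_neg hm]
        rcases find_nonneg_or ['-'] rest with hneg | hpos
        · simp [hneg]
        · have hne : PySem.Chars.find rest ['-'] ≠ -1 := by omega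
          rw [if_neg hne]
          set f := PySem.Chars.find rest ['-'] with hf
          have htn : (f + 1).toNat = f.toNat + 1 := by omega
          simp only [htn, List.take_succ_cons, List.replicate_succ]
          rw [if_neg (by intro h; exact hO (by have := h.2; simp only [List.cons.injEq] at this; exact this.1))]

-- the per-row test as written in abaco_alt (string form) equals rowDig
lemma rowTest_eq (row : String) :
    (let p := PySem.Str.find row "-"
     if p ≠ -1 ∧ PySem.Str.slice row none (some p) = String.ofList (List.replicate p.toNat 'O')
     then some p else none)
      = rowDig row.toList := by
  rw [← condB_eq_rowDig row.toList]
  have hfind : PySem.Str.find row "-" = PySem.Chars.find row.toList ['-'] := by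
    rw [PySem.Str.find_eq]; rfl
  simp only [hfind]
  rcases find_nonneg_or ['-'] row.toList with hneg | hpos
  · simp [hneg]
  · set p := PySem.Chars.find row.toList ['-'] with hp
    have hstreq : ∀ (s t : String), s = t ↔ s.toList = t.toList :=
      fun s t => ⟨fun h => by rw [h], fun h => String.ext (by simpa using h)⟩
    have hslice : PySem.Str.slice row none (some p) = String.ofList (List.replicate p.toNat 'O')
        ↔ row.toList.take p.toNat = List.replicate p.toNat 'O' := by
      rw [hstreq, PySem.Str.toList_slice, PySem.Chars.slice, PySem.List.slice_to _ hpos]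
      simp
    rw [show (if p ≠ -1 ∧ PySem.Str.slice row none (some p) = String.ofList (List.replicate p.toNat 'O')
        then some p else none)
      = (if p ≠ -1 ∧ row.toList.take p.toNat = List.replicate p.toNat 'O' then some p else none)
      from by rw [if_congr (and_congr_right (fun _ => hslice)) rfl rfl]]

-- B's first stage builds exactly the digit list
lemma valid_eq (a : List String) (acc : List Int) :
    a.foldl
      (fun acc row =>
        let p := PySem.Str.find row "-"
        if p ≠ -1 ∧ PySem.Str.slice row none (some p) = String.ofList (List.replicate p.toNat 'O')
        then acc ++ [p] else acc)
      acc = acc ++ digitsOf a := by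
  induction a generalizing acc with
  | nil => simp [digitsOf]
  | cons x xs ih =>
    rw [List.foldl_cons, ih]
    have hstep :
        (let p := PySem.Str.find x "-"
         if p ≠ -1 ∧ PySem.Str.slice x none (some p) = String.ofList (List.replicate p.toNat 'O')
         then acc ++ [p] else acc) = acc ++ (rowDig x.toList).toList := by
      rw [← rowTest_eq x]
      by_cases h : (PySem.Str.find x "-") ≠ -1 ∧
          PySem.Str.slice x none (some (PySem.Str.find x "-"))
            = String.ofList (List.replicate (PySem.Str.find x "-").toNat 'O')
      · simp only [if_pos h, Option.toList_some]
      · simp only [if_neg h, Option.toList_none, List.append_nil]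
    rw [hstep]
    unfold digitsOf
    rw [List.filterMap_cons]
    cases rowDig x.toList <;> simp

-- B's second stage (positional sum) equals the Horner fold over the same digits
lemma sum_eq_horner' (ds : List Int) :
    ((PySem.List.enumerate ds 0).map
        (fun pr => pr.2 * 10 ^ (((ds.length : Int)) - 1 - pr.1).toNat)).sum
      = ds.foldl (fun r d => r * 10 + d) 0 := by
  induction ds using List.reverseRecOn with
  | nil => simp
  | append_singleton xs x ih =>
    rw [List.foldl_append, List.foldl_cons, List.foldl_nil]
    rw [PySem.List.enumerate_append, PySem.List.enumerate_cons, PySem.List.enumerate_nil,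
      List.map_append, List.sum_append]
    have hlast : ((((xs ++ [x]).length : Int)) - 1 - (0 + (xs.length : Int))).toNat = 0 := by
      simp only [List.length_append, List.length_cons, List.length_nil]
      omega
    have hmap : (PySem.List.enumerate xs 0).map
          (fun pr => pr.2 * 10 ^ ((((xs ++ [x]).length : Int)) - 1 - pr.1).toNat)
        = (PySem.List.enumerate xs 0).map
          (fun pr => 10 * (pr.2 * 10 ^ (((xs.length : Int)) - 1 - pr.1).toNat)) := by
      apply List.map_congr_left
      intro pr hpr
      rcases (PySem.List.mem_enumerate_iff xs 0 pr).mp hpr with ⟨k, hk, rfl⟩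
      have he : ((((xs ++ [x]).length : Int)) - 1 - (0 + (k : Int))).toNat
          = (((xs.length : Int)) - 1 - (0 + (k : Int))).toNat + 1 := by
        simp only [List.length_append, List.length_cons, List.length_nil]
        omega
      rw [he, pow_succ]
      ring
    rw [hmap, List.sum_map_mul_left, ih]
    simp only [List.map_cons, List.map_nil, List.sum_cons, List.sum_nil, hlast, pow_zero]
    ring

lemma sum_eq_horner (ds : List Int) :
    (PySem.List.enumerate ds 0).foldl
        (fun s pr => s + pr.2 * 10 ^ (((ds.length : Int)) - 1 - pr.1).toNat) 0
      = ds.foldl (fun r d => r * 10 + d) 0 := by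
  rw [PySem.List.foldl_add, sum_eq_horner', zero_add]

lemma abaco_eq_alt (a : List String) : abaco a = abaco_alt a := by
  unfold abaco abaco_alt
  rw [abaco_foldl_horner a 0]
  simp only [valid_eq a [], List.nil_append]
  exact (sum_eq_horner (digitsOf a)).symm

-- ===== VERDICT (by name: the statement is the Claim_ definition above) =====
theorem abaco_spec : Claim_equal_abaco := fun a _ => abaco_eq_alt a
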